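-- pv_equiv track=rewrite | github.com/kemcrimmins/mit600 | 6.00.1x/final/largest_odd_times.py | largest_odd_times
-- ===== SOURCE A (Python) =====
-- def largest_odd_times(L):
--     """ Assumes L is a non-empty list of ints
--         Returns the largest element of L that occurs an odd number
--         of times in L. If no such element exists, returns None """
--
--     num_times = {} # dictionary to keep track of number of appearences in L
--     odd_times = [] # list for recording integers that appear odd num of times
--
--     for integer in L:
--         if not integer in num_times: # if this is first occurrence, add to dictionary
--             num_times[integer] = 1
--         else:
--             num_times[integer] += 1  # otherwise add to the count of appearnces for integer
--
--     # create list of ingers in num_times that appear odd times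
--
--     for integer in num_times:
--         if num_times[integer] % 2 == 1:
--             odd_times.append(integer)
--
--     if len(odd_times) == 0: # there are no integers in L appearing odd times
--         return None
--     else:
--         return max(odd_times)
-- ===== SOURCE B (Python) =====
-- def largest_odd_times(L):
--     """ Assumes L is a non-empty list of ints
--         Returns the largest element of L that occurs an odd number
--         of times in L. If no such element exists, returns None """
--     s = sorted(L, reverse=True)
--     i = 0
--     n = len(s)
--     while i < n:
--         j = i + 1
--         while j < n and s[j] == s[i]:
--             j += 1
--         if (j - i) % 2 == 1:
--             return s[i]
--         i = j
--     return None
-- ===== Notes on version B (the rewrite author's own statement) =====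
-- stated objective: alternative
-- what changed: Replaces A's occurrence-counting dictionary plus max over odd-count keys by sorting a copy of L in descending order and scanning consecutive equal runs, returning the value of the first run of odd length.
import Mathlib
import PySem

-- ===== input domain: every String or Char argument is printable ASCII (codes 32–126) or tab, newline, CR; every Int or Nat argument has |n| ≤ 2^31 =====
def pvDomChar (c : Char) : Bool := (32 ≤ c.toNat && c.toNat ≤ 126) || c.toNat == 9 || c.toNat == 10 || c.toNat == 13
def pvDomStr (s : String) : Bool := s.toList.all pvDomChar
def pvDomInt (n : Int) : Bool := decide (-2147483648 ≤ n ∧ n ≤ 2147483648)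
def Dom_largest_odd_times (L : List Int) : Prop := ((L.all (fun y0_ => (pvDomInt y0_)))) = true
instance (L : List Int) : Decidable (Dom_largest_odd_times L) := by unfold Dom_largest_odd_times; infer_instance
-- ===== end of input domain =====

-- B replaces A's counting-dictionary pass by sort-descending-then-scan-runs (first run of
-- odd length wins); objective: alternative algorithm, same result.

-- ===== PORT A =====
def largest_odd_times (L : List Int) : Option Int :=
  let num_times : PySem.Dict Int Int :=
    L.foldl (fun d integer =>
      if d.contains integer = false then d.insert integer 1
      else d.insert integer (d.getD integer 0 + 1)) PySem.Dict.empty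
  let odd_times : List Int :=
    num_times.keys.foldl (fun acc integer =>
      if PySem.Int.mod (num_times.getD integer 0) 2 == 1 then acc ++ [integer] else acc) []
  if odd_times.length == 0 then none
  else PySem.List.max? odd_times (fun x => x)

-- ===== PORT B =====
-- the run scan of Source B: the inner while loop (j advancing over equal elements) is the
-- takeWhile over the tail, setting i = j is recursing on the dropWhile
def lotScan : List Int → Option Int
  | [] => none
  | x :: rest =>
    if (1 + (rest.takeWhile (fun y => y == x)).length) % 2 == 1 then some x
    else lotScan (rest.dropWhile (fun y => y == x))
termination_by s => s.length
decreasing_by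
  simpa using Nat.lt_succ_of_le (List.length_dropWhile_le _ _)

def largest_odd_times_alt (L : List Int) : Option Int :=
  lotScan (PySem.List.sorted L (fun y => y) true)

-- ===== PRECONDITION & SPEC =====
def Spec_largest_odd_times (L : List Int) (out : Option Int) : Prop := out = largest_odd_times_alt L
instance (L : List Int) (out : Option Int) : Decidable (Spec_largest_odd_times L out) := by unfold Spec_largest_odd_times; infer_instance

-- ===== CLAIM (what is proved, stated in full; the proofs are below) =====
def Claim_equal_largest_odd_times : Prop := ∀ (L : List Int), Dom_largest_odd_times L → Spec_largest_odd_times L (largest_odd_times L)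

-- ===== LEMMAS AND PROOFS =====

-- the list A's second loop builds: the distinct elements of L with odd multiplicity
def oddsA (L : List Int) : List Int :=
  (PySem.Set.ofList L).filter (fun k => L.count k % 2 == 1)

lemma mem_oddsA {L : List Int} {m : Int} :
    m ∈ oddsA L ↔ m ∈ L ∧ L.count m % 2 = 1 := by
  simp [oddsA, List.mem_filter, PySem.Set.mem_ofList]

lemma A_eq (L : List Int) :
    largest_odd_times L =
      if (oddsA L).length == 0 then none
      else PySem.List.max? (oddsA L) (fun x => x) := by
  have hf : (fun (d : PySem.Dict Int Int) (integer : Int) =>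
        if d.contains integer = false then d.insert integer 1
        else d.insert integer (d.getD integer 0 + 1))
      = (fun d integer => d.insert integer (d.getD integer 0 + 1)) := by
    funext d x
    by_cases h : d.contains x = true
    · simp [h]
    · have h' : d.contains x = false := by simpa using h
      simp [h', PySem.Dict.getD_of_not_contains d (0 : Int) h']
  have hfilter :
      (PySem.Dict.counter L).keys.filter
          (fun k => PySem.Int.mod ((PySem.Dict.counter L).getD k 0) 2 == 1)
        = oddsA L := by
    rw [PySem.Dict.keys_counter, oddsA]
    apply List.filter_congr
    intro k _
    rw [PySem.Dict.getD_counter]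
    have hmod : PySem.Int.mod ((L.count k : Int)) 2 = ((L.count k % 2 : Nat) : Int) := by
      exact_mod_cast PySem.Int.mod_natCast (L.count k) 2
    rw [hmod]
    rcases Nat.mod_two_eq_zero_or_one (L.count k) with h | h <;> simp [h]
  simp only [largest_odd_times, hf, PySem.Dict.foldl_insert_getD_add_one_eq_counter,
    PySem.List.foldl_append_if_eq_filter, List.nil_append, hfilter]

-- a dropped head fails the dropWhile predicate
lemma dropWhile_cons_head_false {p : Int → Bool} {l d' : List Int} {d0 : Int}
    (h : l.dropWhile p = d0 :: d') : p d0 = false := by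
  induction l with
  | nil => simp at h
  | cons a l' ih =>
      rw [List.dropWhile_cons] at h
      by_cases hp : p a
      · rw [if_pos hp] at h; exact ih h
      · rw [if_neg hp] at h
        injection h with h1 _
        subst h1
        simpa using hp

-- the B-side invariant: on a descending list, lotScan returns the largest element
-- of odd multiplicity (none if there is none)
lemma lotScan_char : ∀ (n : Nat) (s : List Int), s.length ≤ n →
    s.Pairwise (fun a b => b ≤ a) →
    (lotScan s = none → ∀ y ∈ s, s.count y % 2 = 0) ∧
    (∀ m, lotScan s = some m →
        m ∈ s ∧ s.count m % 2 = 1 ∧ ∀ y ∈ s, s.count y % 2 = 1 → y ≤ m) := by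
  intro n
  induction n with
  | zero =>
      intro s hlen _
      have hs : s = [] := by
        cases s with
        | nil => rfl
        | cons a t => simp at hlen
      subst hs
      constructor
      · intro _ y hy; simp at hy
      · intro m hm; rw [lotScan] at hm; simp at hm
  | succ n ih =>
      intro s hlen hpw
      cases s with
      | nil =>
          constructor
          · intro _ y hy; simp at hy
          · intro m hm; rw [lotScan] at hm; simp at hm
      | cons x rest =>
          set t := rest.takeWhile (fun y => y == x) with ht
          set d := rest.dropWhile (fun y => y == x) with hd
          have hsplit : t ++ d = rest := by
            rw [ht, hd]; exact List.takeWhile_append_dropWhile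
          have htall : ∀ y ∈ t, y = x := by
            intro y hy
            have := List.mem_takeWhile_imp hy
            simpa using this
          have hrest_le : ∀ y ∈ rest, y ≤ x := (List.pairwise_cons.1 hpw).1
          have hdsub : d.Sublist rest := by rw [hd]; exact List.dropWhile_sublist _
          have hdpw : d.Pairwise (fun a b => b ≤ a) :=
            ((List.pairwise_cons.1 hpw).2).sublist hdsub
          have hdlt : ∀ y ∈ d, y < x := by
            cases hdc : d with
            | nil => intro y hy; simp at hy
            | cons d0 d' =>
                have hdw : rest.dropWhile (fun y => y == x) = d0 :: d' := by
                  rw [← hd]; exact hdc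
                have hpd0 : (d0 == x) = false := dropWhile_cons_head_false (p := fun y => y == x) hdw
                have hd0x : d0 ≠ x := by simpa using hpd0
                have hd0mem : d0 ∈ rest := hdsub.subset (by rw [hdc]; exact List.mem_cons_self ..)
                have hd0lt : d0 < x := lt_of_le_of_ne (hrest_le d0 hd0mem) hd0x
                intro y hy
                rcases List.mem_cons.1 hy with h | h
                · rw [h]; exact hd0lt
                · have hpw' := hdc ▸ hdpw
                  have : y ≤ d0 := (List.pairwise_cons.1 hpw').1 y h
                  exact lt_of_le_of_lt this hd0lt
          have hcountx : (x :: rest).count x = 1 + t.length := by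
            have h1 : t.count x = t.length :=
              List.count_eq_length.2 (fun b hb => (htall b hb).symm)
            have h2 : d.count x = 0 :=
              List.count_eq_zero.2 (fun hx => lt_irrefl x (hdlt x hx))
            rw [List.count_cons_self, ← hsplit, List.count_append, h1, h2]
            omega
          have hcounty : ∀ y, y ≠ x → (x :: rest).count y = d.count y := by
            intro y hyx
            have h1 : t.count y = 0 :=
              List.count_eq_zero.2 (fun hy => hyx (htall y hy))
            rw [List.count_cons_of_ne (Ne.symm hyx), ← hsplit, List.count_append, h1]
            omega
          have hdlen : d.length ≤ n := by
            have h1 : d.length ≤ rest.length := by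
              rw [hd]; exact List.length_dropWhile_le _ _
            have h2 : rest.length ≤ n := by simpa using Nat.succ_le_succ_iff.1 hlen
            omega
          have IH := ih d hdlen hdpw
          have hmemd : ∀ y ∈ x :: rest, y ≠ x → y ∈ d := by
            intro y hy hyx
            rcases List.mem_cons.1 hy with h | h
            · exact absurd h hyx
            · rw [← hsplit] at h
              rcases List.mem_append.1 h with h | h
              · exact absurd (htall y h) hyx
              · exact h
          have hunf : lotScan (x :: rest) =
              if (1 + t.length) % 2 == 1 then some x else lotScan d := by
            rw [lotScan]
          by_cases hodd : (1 + t.length) % 2 = 1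
          · -- run of odd length: returns x
            have hres : lotScan (x :: rest) = some x := by
              rw [hunf]; simp [hodd]
            constructor
            · intro hnone; rw [hres] at hnone; simp at hnone
            · intro m hm
              rw [hres] at hm
              injection hm with hm; subst hm
              refine ⟨List.mem_cons_self .., by rw [hcountx]; exact hodd, ?_⟩
              intro y hy _
              rcases List.mem_cons.1 hy with h | h
              · exact le_of_eq h
              · exact hrest_le y h
          · -- even run: recurse on the remainder
            have hres : lotScan (x :: rest) = lotScan d := by
              rw [hunf]; simp [hodd]
            have hxeven : (x :: rest).count x % 2 = 0 := by
              rw [hcountx]; omega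
            constructor
            · intro hnone
              rw [hres] at hnone
              intro y hy
              by_cases hyx : y = x
              · subst hyx; exact hxeven
              · rw [hcounty y hyx]
                exact IH.1 hnone y (hmemd y hy hyx)
            · intro m hm
              rw [hres] at hm
              obtain ⟨hmem, hcnt, hmax⟩ := IH.2 m hm
              have hmx : m ≠ x := fun h => lt_irrefl x (h ▸ hdlt m hmem)
              refine ⟨?_, ?_, ?_⟩
              · apply List.mem_cons_of_mem
                rw [← hsplit]; exact List.mem_append_right _ hmem
              · rw [hcounty m hmx]; exact hcnt
              · intro y hy hyo
                by_cases hyx : y = x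
                · subst hyx; rw [hxeven] at hyo; omega
                · apply hmax y (hmemd y hy hyx)
                  rw [← hcounty y hyx]; exact hyo

-- ===== VERDICT (by name: the statement is the Claim_ definition above) =====
theorem largest_odd_times_spec : Claim_equal_largest_odd_times := by
  intro L _
  unfold Spec_largest_odd_times largest_odd_times_alt
  set s := PySem.List.sorted L (fun y => y) true with hs
  have hperm : s.Perm L := PySem.List.sorted_perm ..
  have hpw : s.Pairwise (fun a b => b ≤ a) := by
    have := PySem.List.sorted_pairwise_rev (xs := L) (key := fun y => y)
    simpa [hs] using this
  have hchar := lotScan_char s.length s (le_refl _) hpw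
  have hcount : ∀ y : Int, s.count y = L.count y := fun y => hperm.count_eq y
  have hmem : ∀ y : Int, y ∈ s ↔ y ∈ L := fun _ => hperm.mem_iff
  rw [A_eq]
  by_cases hnil : oddsA L = []
  · -- no element of odd multiplicity
    rw [hnil]
    simp only [List.length_nil]
    cases hb : lotScan s with
    | none => simp
    | some m =>
        obtain ⟨hmem', hcnt, _⟩ := hchar.2 m hb
        have : m ∈ oddsA L := mem_oddsA.2 ⟨(hmem m).1 hmem', by rw [← hcount]; exact hcnt⟩
        rw [hnil] at this
        simp at this
  · have hlen : ((oddsA L).length == 0) = false := by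
      simp [List.length_eq_zero_iff, hnil]
    rw [hlen]
    simp only [Bool.false_eq_true, if_false]
    cases ha : PySem.List.max? (oddsA L) (fun x => x) with
    | none => exact absurd ((PySem.List.max?_eq_none_iff _ _).1 ha) hnil
    | some m =>
        have hmo : m ∈ oddsA L := PySem.List.max?_mem ha
        obtain ⟨hmL, hmodd⟩ := mem_oddsA.1 hmo
        cases hb : lotScan s with
        | none =>
            have := hchar.1 hb m ((hmem m).2 hmL)
            rw [hcount] at this
            omega
        | some m' =>
            obtain ⟨hm'mem, hm'cnt, hm'max⟩ := hchar.2 m' hb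
            have h1 : m ≤ m' := by
              apply hm'max m ((hmem m).2 hmL)
              rw [hcount]; exact hmodd
            have h2 : m' ≤ m := by
              have hin : m' ∈ oddsA L :=
                mem_oddsA.2 ⟨(hmem m').1 hm'mem, by rw [← hcount]; exact hm'cnt⟩
              have := PySem.List.max?_isMax ha m' hin
              simpa using this
            rw [le_antisymm h1 h2]
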